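-- pv_equiv track=rewrite | github.com/marph91/jimmy | src/formats/tiddlywiki.py | split_tags
-- ===== SOURCE A (Python) =====
-- def split_tags(tag_string: str) -> list[str]:
--     """
--     Tags are space separated. Tags with spaces are surrounded by double brackets.
--
--     >>> split_tags("tag1 tag2 tag3 [[tag with spaces]]")
--     ['tag1', 'tag2', 'tag3', 'tag with spaces']
--     >>> split_tags("[[tag with spaces]]")
--     ['tag with spaces']
--     >>> split_tags("tag1 tag2 tag3")
--     ['tag1', 'tag2', 'tag3']
--     >>> split_tags("")
--     []
--     """
--     if not tag_string.strip():
--         return []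
--     space_splitted = tag_string.split(" ")
--     final_tags = []
--     space_separated_tag = ""
--     for part in space_splitted:
--         if space_separated_tag:
--             if part.endswith("]]"):
--                 space_separated_tag += " " + part[:-2]
--                 final_tags.append(space_separated_tag)
--                 space_separated_tag = ""
--             else:
--                 space_separated_tag += " " + part
--         elif part.startswith("[["):
--             space_separated_tag = part[2:]
--         else:
--             final_tags.append(part)
--     return final_tags
-- ===== SOURCE B (Python) =====
-- def split_tags(tag_string: str) -> list[str]:
--     if not tag_string.strip():
--         return []
--     tokens = tag_string.split(" ")
--     tags = []
--     i = 0
--     while i < len(tokens):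
--         if tokens[i].startswith("[["):
--             j = i
--             while not tokens[j].endswith("]]"):
--                 j += 1
--                 if j == len(tokens):
--                     raise ValueError(f"unclosed [[ in {tag_string!r}")
--             tags.append(" ".join(tokens[i:j + 1])[2:-2])
--             i = j + 1
--         else:
--             tags.append(tokens[i])
--             i += 1
--     return tags
-- ===== Notes on version B (the rewrite author's own statement) =====
-- stated objective: alternative
-- what changed: Replaces A's running-accumulator state machine (a partial-tag string threaded through one pass) by an index scan that finds each bracketed group's closing token with an inner forward scan and emits the group via one join-and-trim; Pre_ excludes strings with an unclosed '[[' group, on which A silently drops the opener and everything after it while B raises ValueError.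
-- intended difference: On strings with a token outside bracketed groups that starts with '[[' and also ends with ']]' (a single-token tag like '[[tag]]') or is a bare '[[', A's accumulator never lets the opening token close its own group and drops the tag (A returns [] for '[[tag]]'); B returns the bracket-stripped tag (['tag']), the intended reading of a bracketed tag. — e.g. on split_tags("[[tag]]"): A returns [], B returns ["tag"]
-- outside the precondition, e.g. on split_tags('[[a b'): A returns [], B raises ValueError; on split_tags('[['): A returns [], B raises ValueError
import Mathlib
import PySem

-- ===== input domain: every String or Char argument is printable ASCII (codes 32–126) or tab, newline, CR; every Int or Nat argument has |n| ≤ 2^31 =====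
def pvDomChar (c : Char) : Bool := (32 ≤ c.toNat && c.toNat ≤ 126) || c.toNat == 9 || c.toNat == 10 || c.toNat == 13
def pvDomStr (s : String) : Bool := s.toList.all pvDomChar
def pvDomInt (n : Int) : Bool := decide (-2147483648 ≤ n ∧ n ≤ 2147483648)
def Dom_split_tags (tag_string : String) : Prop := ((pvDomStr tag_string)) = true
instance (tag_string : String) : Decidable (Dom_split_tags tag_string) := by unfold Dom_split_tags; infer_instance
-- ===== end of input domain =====

-- B replaces A's running-accumulator state machine by an index scan that joins each
-- bracketed group in one step; B raises on an unclosed '[[' group (outside Pre_) and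
-- returns the bracket-stripped tag for a self-closing '[[tag]]' token, where A drops it (D_).

-- ===== PORT A =====
-- tag_string.split(" "): the separator is the non-empty literal " ", so split? is always `some`
def pySplitSpace (s : String) : List String := (PySem.Str.split? s " ").getD []

-- the for-loop of A, state (final_tags = acc, space_separated_tag = sep)
def splitTagsLoop (toks : List String) (acc : List String) (sep : String) : List String :=
  match toks with
  | [] => acc
  | part :: rest =>
    if sep ≠ "" then
      if PySem.Str.endswith part "]]" then
        splitTagsLoop rest (acc ++ [sep ++ " " ++ PySem.Str.slice part none (some (-2))]) ""
      else
        splitTagsLoop rest acc (sep ++ " " ++ part)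
    else if PySem.Str.startswith part "[[" then
      splitTagsLoop rest acc (PySem.Str.slice part (some 2) none)
    else
      splitTagsLoop rest (acc ++ [part]) sep

def split_tags (tag_string : String) : List String :=
  if PySem.Str.strip tag_string = "" then []
  else splitTagsLoop (pySplitSpace tag_string) [] ""

-- ===== PORT B =====
-- B's inner `while not tokens[j].endswith("]]")` scan, started AT the opener:
-- returns (tokens up to and including the first closing token, the tokens after it)
def findClose (toks : List String) : Option (List String × List String) :=
  match toks with
  | [] => none
  | p :: rest =>
    if PySem.Str.endswith p "]]" then some ([p], rest)
    else
      match findClose rest with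
      | none => none
      | some (mid, after) => some (p :: mid, after)

-- needed by `decreasing_by` of scanB
theorem findClose_after_lt (toks : List String) (mid after : List String)
    (h : findClose toks = some (mid, after)) : after.length < toks.length := by
  induction toks generalizing mid after with
  | nil => simp [findClose] at h
  | cons p rest ih =>
    simp only [findClose] at h
    split at h
    · simp at h
      rw [← h.2]
      simp
    · cases hfc : findClose rest with
      | none => rw [hfc] at h; simp at h
      | some pr =>
        rw [hfc] at h
        obtain ⟨m, a⟩ := pr
        simp at h
        have := ih m a hfc
        simp [← h.2]
        omega

-- B's outer `while i < len(tokens)` loop (index i ↦ the suffix tokens[i:])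
def scanB (toks : List String) : List String :=
  match toks with
  | [] => []
  | t :: rest =>
    if PySem.Str.startswith t "[[" then
      match h : findClose (t :: rest) with
      | none => []      -- here the Python B raises ValueError (excluded by Pre_)
      | some (mid, after) =>
        PySem.Str.slice (PySem.Str.join " " mid) (some 2) (some (-2)) :: scanB after
    else t :: scanB rest
termination_by toks.length
decreasing_by
  · exact findClose_after_lt (t :: rest) mid after h
  · simp

def split_tags_alt (tag_string : String) : List String :=
  if PySem.Str.strip tag_string = "" then []
  else scanB (pySplitSpace tag_string)

-- ===== PRECONDITION & SPEC =====
def hasCloser (l : List String) : Bool := l.any (fun t => PySem.Str.endswith t "]]")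

-- every token starting with "[[" has a token ending with "]]" at its position or later
def preTok : List String → Bool
  | [] => true
  | t :: rest => (!(PySem.Str.startswith t "[[") || hasCloser (t :: rest)) && preTok rest

-- Pre_ excludes strings with an unclosed '[[' group, on which A silently drops the opener
-- and everything after it (an accident of its accumulator) while B raises ValueError.
def Pre_split_tags (tag_string : String) : Prop := preTok (pySplitSpace tag_string) = true
instance (tag_string : String) : Decidable (Pre_split_tags tag_string) := by unfold Pre_split_tags; infer_instance

def pvWitness_split_tags : String := "tag1 tag2 [[tag with spaces]]"

def quirkTok (t : String) : Bool :=
  PySem.Str.startswith t "[[" && (PySem.Str.endswith t "]]" || t == "[[")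

-- token i lies OUTSIDE every bracketed group exactly when the nearest preceding token that
-- opens ("[["-prefixed) or closes ("]]"-suffixed) a group, if any, closes one
def quirkAtTop (toks : List String) : Prop :=
  ∃ i < toks.length, quirkTok (toks.getD i "") = true ∧
    ∀ x ∈ (toks.take i).reverse.find?
        (fun u => PySem.Str.startswith u "[[" || PySem.Str.endswith u "]]"),
      PySem.Str.endswith x "]]" = true

-- On non-blank strings with a token outside bracketed groups that starts with '[[' and also ends
-- with ']]' (a single-token tag like '[[tag]]') or is a bare '[[', A's accumulator never lets an
-- opening token close its own group, so A drops the tag (A '[[tag]]' → []); B returns the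
-- bracket-stripped tag (['tag']), the intended reading of a bracketed tag.
def D_split_tags (tag_string : String) : Prop :=
  PySem.Str.strip tag_string ≠ "" ∧ quirkAtTop (pySplitSpace tag_string)
instance (tag_string : String) : Decidable (D_split_tags tag_string) := by unfold D_split_tags quirkAtTop; infer_instance

def Spec_split_tags (tag_string : String) (out : List String) : Prop :=
  ¬ D_split_tags tag_string → out = split_tags_alt tag_string
instance (tag_string : String) (out : List String) : Decidable (Spec_split_tags tag_string out) := by unfold Spec_split_tags; infer_instance

def pvDiffWitness_split_tags : String := "[[tag]]"
def pvDiffWitnessOut_split_tags : (List String) × (List String) := ([], ["tag"])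

-- ===== CLAIM (what is proved, stated in full; the proofs are below) =====
def Claim_unchanged_split_tags : Prop := ∀ (tag_string : String), Dom_split_tags tag_string → Pre_split_tags tag_string → Spec_split_tags tag_string (split_tags tag_string)
def Claim_changed_split_tags : Prop := Dom_split_tags (pvDiffWitness_split_tags) ∧ Pre_split_tags (pvDiffWitness_split_tags) ∧ D_split_tags (pvDiffWitness_split_tags) ∧ split_tags (pvDiffWitness_split_tags) = pvDiffWitnessOut_split_tags.1 ∧ split_tags_alt (pvDiffWitness_split_tags) = pvDiffWitnessOut_split_tags.2 ∧ pvDiffWitnessOut_split_tags.1 ≠ pvDiffWitnessOut_split_tags.2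
def Claim_exact_split_tags : Prop := ∀ (tag_string : String), Dom_split_tags tag_string → Pre_split_tags tag_string → D_split_tags tag_string → split_tags tag_string ≠ split_tags_alt tag_string

-- ===== LEMMAS AND PROOFS =====

-- the tokens after the first token ending with "]]" (the tokens a bracketed group absorbs)
def dropGroup : List String → Option (List String)
  | [] => none
  | p :: rest => if PySem.Str.endswith p "]]" then some rest else dropGroup rest

def topQuirkFreeF : Nat → List String → Bool
  | 0, _ => true
  | _ + 1, [] => true
  | f + 1, t :: rest =>
    if PySem.Str.startswith t "[[" then
      !quirkTok t &&
        (match dropGroup rest with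
         | none => true
         | some after => topQuirkFreeF f after)
    else topQuirkFreeF f rest

-- no quirky token outside a bracketed group (fuel = list length, always sufficient)
def topQuirkFree (toks : List String) : Bool := topQuirkFreeF toks.length toks

-- A's accumulator run over a token group `mid` (whose last token is the closing one)
def extendSep (sep : String) : List String → String
  | [] => sep
  | [c] => sep ++ " " ++ PySem.Str.slice c none (some (-2))
  | p :: q :: rest => extendSep (sep ++ " " ++ p) (q :: rest)

-- the characters a token list contributes after a `" ".join`, each token preceded by its space
def glue (parts : List String) : List Char := (parts.map (fun p => ' ' :: p.toList)).flatten

theorem extendSep_cons (sep p : String) (l : List String) (h : l ≠ []) :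
    extendSep sep (p :: l) = extendSep (sep ++ " " ++ p) l := by
  cases l with
  | nil => exact absurd rfl h
  | cons q rest => rfl

theorem findClose_spec (toks : List String) : ∀ mid after, findClose toks = some (mid, after) →
    ∃ m c, mid = m ++ [c] ∧ PySem.Str.endswith c "]]" = true ∧ toks = m ++ c :: after := by
  induction toks with
  | nil => intro mid after h; simp [findClose] at h
  | cons p rest ih =>
    intro mid after h
    by_cases he : PySem.Str.endswith p "]]" = true
    · rw [findClose, if_pos he] at h
      simp at h
      exact ⟨[], p, by simp [← h.1], he, by simp [h.2]⟩
    · rw [findClose, if_neg he] at h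
      cases hfc : findClose rest with
      | none => rw [hfc] at h; simp at h
      | some pr =>
        obtain ⟨m0, a0⟩ := pr
        rw [hfc] at h
        simp at h
        obtain ⟨m, c, hm, hc, ht⟩ := ih m0 a0 hfc
        exact ⟨p :: m, c, by simp [← h.1, hm], hc, by simp [ht, ← h.2]⟩

theorem hasCloser_findClose (l : List String) (h : hasCloser l = true) :
    ∃ mid after, findClose l = some (mid, after) := by
  induction l with
  | nil => simp [hasCloser] at h
  | cons p rest ih =>
    by_cases he : PySem.Str.endswith p "]]" = true
    · exact ⟨[p], rest, by rw [findClose, if_pos he]⟩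
    · have hr : hasCloser rest = true := by
        simp only [hasCloser, List.any_eq_true] at h ⊢
        rcases h with ⟨t, ht, hend⟩
        rcases List.mem_cons.mp ht with rfl | ht'
        · exact absurd hend he
        · exact ⟨t, ht', hend⟩
      obtain ⟨mid, after, hfc⟩ := ih hr
      exact ⟨p :: mid, after, by rw [findClose, if_neg he, hfc]⟩

theorem preTok_suffix (l l' : List String) (hs : l' <:+ l) (h : preTok l = true) :
    preTok l' = true := by
  induction l generalizing l' with
  | nil => rw [List.suffix_nil.mp hs]; exact h
  | cons x rest ih =>
    rcases List.suffix_cons_iff.mp hs with rfl | hs'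
    · exact h
    · have : preTok rest = true := by
        rw [preTok, Bool.and_eq_true] at h
        exact h.2
      exact ih l' hs' this

theorem dropGroup_eq (l : List String) : dropGroup l = Option.map Prod.snd (findClose l) := by
  induction l with
  | nil => rfl
  | cons p rest ih =>
    by_cases he : PySem.Str.endswith p "]]" = true
    · rw [dropGroup, if_pos he, findClose, if_pos he]
      rfl
    · rw [dropGroup, if_neg he, findClose, if_neg he, ih]
      cases findClose rest with
      | none => rfl
      | some pr => rfl

theorem tqf_congr : ∀ (f g : Nat) (toks : List String), toks.length ≤ f → toks.length ≤ g →
    topQuirkFreeF f toks = topQuirkFreeF g toks := by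
  intro f
  induction f with
  | zero =>
    intro g toks hf _
    have ht : toks = [] := by
      cases toks with
      | nil => rfl
      | cons a b => simp at hf
    subst ht
    cases g <;> rfl
  | succ f ih =>
    intro g toks hf hg
    cases toks with
    | nil => cases g <;> rfl
    | cons t rest =>
      cases g with
      | zero => simp at hg
      | succ g' =>
        simp only [topQuirkFreeF]
        by_cases hs : PySem.Str.startswith t "[[" = true
        · rw [if_pos hs, if_pos hs]
          cases hd : dropGroup rest with
          | none => rfl
          | some after =>
            have hlt : after.length < rest.length := by
              rw [dropGroup_eq] at hd
              cases hfc : findClose rest with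
              | none => rw [hfc] at hd; simp at hd
              | some pr =>
                obtain ⟨mid0, after0⟩ := pr
                rw [hfc] at hd
                simp at hd
                rw [← hd]
                exact findClose_after_lt rest mid0 after0 hfc
            simp only [List.length_cons] at hf hg
            show (!quirkTok t && topQuirkFreeF f after) = (!quirkTok t && topQuirkFreeF g' after)
            rw [ih g' after (by omega) (by omega)]
        · rw [if_neg hs, if_neg hs]
          simp only [List.length_cons] at hf hg
          exact ih g' rest (by omega) (by omega)

theorem topQuirkFree_cons_nonopener (t : String) (rest : List String)
    (hs : ¬ PySem.Str.startswith t "[[" = true) :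
    topQuirkFree (t :: rest) = topQuirkFree rest := by
  rw [topQuirkFree, topQuirkFree, List.length_cons]
  simp only [topQuirkFreeF]
  rw [if_neg hs]

theorem topQuirkFree_cons_opener (t : String) (rest mid after : List String)
    (hs : PySem.Str.startswith t "[[" = true)
    (hfc : findClose rest = some (mid, after)) :
    topQuirkFree (t :: rest) = (!quirkTok t && topQuirkFree after) := by
  rw [topQuirkFree, List.length_cons]
  simp only [topQuirkFreeF]
  rw [if_pos hs, dropGroup_eq, hfc]
  show (!quirkTok t && topQuirkFreeF rest.length after) = _
  rw [tqf_congr rest.length after.length after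
    (le_of_lt (findClose_after_lt rest mid after hfc)) le_rfl]
  rfl

theorem join_toList (t : String) (mid : List String) :
    (PySem.Str.join " " (t :: mid)).toList = t.toList ++ glue mid := by
  induction mid generalizing t with
  | nil => simp [PySem.Str.toList_join, PySem.Chars.join_singleton, glue]
  | cons p rest ih =>
    have h1 := PySem.Chars.join_cons_cons (" ".toList) t.toList (p.toList) (rest.map String.toList)
    have h2 := ih p
    simp only [PySem.Str.toList_join, List.map_cons] at *
    rw [h1, h2]
    simp [glue]

theorem slice_to_neg2 (c : List Char) :
    PySem.List.slice c none (some (-2)) = c.take (c.length - 2) := by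
  simp [PySem.List.slice, PySem.List.clampIdx]
  split_ifs with h
  · have h0 : c.length - 2 = 0 := by omega
    simp [h0]
  · omega

theorem extendSep_toList (m : List String) (c sep : String) :
    (extendSep sep (m ++ [c])).toList
      = sep.toList ++ glue m ++ ' ' :: (c.toList.take (c.toList.length - 2)) := by
  induction m generalizing sep with
  | nil =>
    show (sep ++ " " ++ PySem.Str.slice c none (some (-2))).toList = _
    simp [PySem.Str.toList_slice, slice_to_neg2, glue]
  | cons p m' ih =>
    rw [show (p :: m') ++ [c] = p :: (m' ++ [c]) from rfl,
        extendSep_cons _ _ _ (by simp), ih]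
    simp [glue]

theorem slice_two_negtwo (A M C : List Char) (hA : 2 ≤ A.length) (hC : 2 ≤ C.length) :
    PySem.List.slice (A ++ M ++ C) (some 2) (some (-2))
      = A.drop 2 ++ M ++ C.take (C.length - 2) := by
  have hstep : PySem.List.slice (A ++ M ++ C) (some 2) (some (-2))
      = List.take ((A ++ M ++ C).length - 4) (List.drop 2 (A ++ M ++ C)) := by
    simp [PySem.List.slice, PySem.List.clampIdx]
    have h2 : min 2 (A.length + (M.length + C.length)) = 2 := by omega
    rw [h2]
    split_ifs with h
    · omega
    · congr 1
      omega
  rw [hstep]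
  have hdrop : List.drop 2 (A ++ M ++ C) = (A.drop 2 ++ M) ++ C := by
    rw [List.append_assoc, List.drop_append_of_le_length hA, List.append_assoc]
  rw [hdrop]
  have harith : (A ++ M ++ C).length - 4 = (A.drop 2 ++ M).length + (C.length - 2) := by
    simp
    omega
  rw [harith, List.take_length_add_append]

theorem loop_accum (toks : List String) : ∀ (acc : List String) (sep : String), sep ≠ "" →
    splitTagsLoop toks acc sep =
      match findClose toks with
      | none => acc
      | some (mid, after) => splitTagsLoop after (acc ++ [extendSep sep mid]) "" := by
  induction toks with
  | nil => intro acc sep h; simp [splitTagsLoop, findClose]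
  | cons p rest ih =>
    intro acc sep h
    by_cases he : PySem.Str.endswith p "]]" = true
    · rw [splitTagsLoop, if_pos h, if_pos he, findClose, if_pos he]
      rfl
    · rw [splitTagsLoop, if_pos h, if_neg he, findClose, if_neg he]
      have h' : sep ++ " " ++ p ≠ "" := by
        intro hc
        have := congrArg String.toList hc
        simp at this
      rw [ih acc _ h']
      cases hfc : findClose rest with
      | none => rfl
      | some pr =>
        obtain ⟨mid, after⟩ := pr
        obtain ⟨m, c, hm, -, -⟩ := findClose_spec rest mid after hfc
        show splitTagsLoop after (acc ++ [extendSep (sep ++ " " ++ p) mid]) ""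
            = splitTagsLoop after (acc ++ [extendSep sep (p :: mid)]) ""
        rw [extendSep_cons sep p mid (by simp [hm])]

-- the content A accumulates for one group equals B's join-and-trim of that group
theorem group_key (t c : String) (m : List String)
    (hlen : 2 < t.toList.length)
    (hc2 : 2 ≤ c.toList.length) :
    extendSep (PySem.Str.slice t (some 2) none) (m ++ [c])
      = PySem.Str.slice (PySem.Str.join " " (t :: (m ++ [c]))) (some 2) (some (-2)) := by
  have hsepl : (PySem.Str.slice t (some 2) none).toList = t.toList.drop 2 := by
    rw [PySem.Str.toList_slice, PySem.Chars.slice_eq_listSlice,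
        PySem.List.slice_from t.toList (by norm_num : (0:Int) ≤ (2:Int))]
    rfl
  apply String.toList_inj.mp
  rw [extendSep_toList, hsepl]
  rw [PySem.Str.toList_slice, PySem.Chars.slice_eq_listSlice, join_toList]
  have hglue : glue (m ++ [c]) = glue m ++ ' ' :: c.toList := by
    simp [glue]
  rw [hglue]
  rw [show t.toList ++ (glue m ++ ' ' :: c.toList)
        = t.toList ++ (glue m ++ [' ']) ++ c.toList by simp]
  rw [slice_two_negtwo t.toList (glue m ++ [' ']) c.toList (by omega) hc2]
  simp

theorem loop_eq_scanB_aux (n : Nat) : ∀ (toks acc : List String), toks.length ≤ n →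
    preTok toks = true → topQuirkFree toks = true →
    splitTagsLoop toks acc "" = acc ++ scanB toks := by
  induction n with
  | zero =>
    intro toks acc h _ _
    have ht : toks = [] := by
      cases toks with
      | nil => rfl
      | cons a b => simp at h
    subst ht
    simp [splitTagsLoop, scanB]
  | succ n ih =>
    intro toks acc h hp hq
    cases toks with
    | nil => simp [splitTagsLoop, scanB]
    | cons t rest =>
      have hrest : rest.length ≤ n := by simp at h; omega
      have hprest : preTok rest = true := by
        rw [preTok, Bool.and_eq_true] at hp
        exact hp.2
      rw [splitTagsLoop, if_neg (by simp : ¬("" : String) ≠ "")]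
      by_cases hs : PySem.Str.startswith t "[[" = true
      · -- t opens a group; by ¬quirkTok t it does not close itself and is not bare "[["
        have hqt : quirkTok t = false := by
          have h0 := hq
          rw [topQuirkFree, List.length_cons] at h0
          simp only [topQuirkFreeF] at h0
          rw [if_pos hs, Bool.and_eq_true] at h0
          cases hb : quirkTok t with
          | false => rfl
          | true => rw [hb] at h0; exact absurd h0.1 (by simp)
        have hqt' : PySem.Str.endswith t "]]" = false ∧ (t == "[[") = false := by
          rw [quirkTok, hs, Bool.true_and, Bool.or_eq_false_iff] at hqt
          exact hqt
        have hne : PySem.Str.endswith t "]]" = false := hqt'.1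
        have hnb : t ≠ "[[" := by
          intro hc
          rw [hc] at hqt'
          simp at hqt'
        have hpre2 : ['[', '['] <+: t.toList := by
          have h0 := (PySem.Chars.startswith_iff t.toList (("[[" : String).toList)).mp
            (by rw [← PySem.Str.startswith_eq]; exact hs)
          exact h0
        have hlen : 2 < t.toList.length := by
          obtain ⟨tail, htl⟩ := hpre2
          rcases tail with - | ⟨x, xs⟩
          · exfalso
            apply hnb
            apply String.toList_inj.mp
            rw [← htl]
            rfl
          · rw [← htl]
            simp
        have hsepl : (PySem.Str.slice t (some 2) none).toList = t.toList.drop 2 := by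
          rw [PySem.Str.toList_slice, PySem.Chars.slice_eq_listSlice,
              PySem.List.slice_from t.toList (by norm_num : (0:Int) ≤ (2:Int))]
          rfl
        have hsep : PySem.Str.slice t (some 2) none ≠ "" := by
          intro hc
          have h1 : (List.drop 2 t.toList).length = 0 := by
            rw [← hsepl, hc]
            rfl
          rw [List.length_drop] at h1
          omega
        rw [if_pos hs, loop_accum rest acc _ hsep]
        -- Pre gives a closer in (t :: rest); t is not one, so rest has one
        have hcl : hasCloser rest = true := by
          rw [preTok, Bool.and_eq_true, Bool.or_eq_true] at hp
          rcases hp.1 with h1 | h1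
          · rw [Bool.not_eq_eq_eq_not, Bool.not_true] at h1
            rw [h1] at hs
            exact absurd hs (by simp)
          · simp only [hasCloser, List.any_eq_true] at h1 ⊢
            rcases h1 with ⟨x, hx, hex⟩
            rcases List.mem_cons.mp hx with rfl | hx'
            · rw [hne] at hex
              exact absurd hex (by simp)
            · exact ⟨x, hx', hex⟩
        obtain ⟨mid, after, hfc⟩ := hasCloser_findClose rest hcl
        rw [hfc]
        obtain ⟨m, c, hm, hc, hrest_eq⟩ := findClose_spec rest mid after hfc
        have hfc2 : findClose (t :: rest) = some (t :: mid, after) := by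
          rw [findClose, if_neg (by rw [hne]; simp), hfc]
        have hafter_suffix : after <:+ rest := ⟨m ++ [c], by simp [hrest_eq]⟩
        have hafterlen : after.length ≤ n := by
          have := findClose_after_lt rest mid after hfc
          omega
        have hpafter : preTok after = true := preTok_suffix rest after hafter_suffix hprest
        have hqafter : topQuirkFree after = true := by
          have h0 := hq
          rw [topQuirkFree_cons_opener t rest mid after hs hfc, Bool.and_eq_true] at h0
          exact h0.2
        have hscan : scanB (t :: rest)
            = PySem.Str.slice (PySem.Str.join " " (t :: mid)) (some 2) (some (-2)) :: scanB after := by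
          rw [scanB, if_pos hs]
          split
          · rename_i heq
            rw [hfc2] at heq
            exact absurd heq (by simp)
          · rename_i mid1 after1 heq
            rw [hfc2] at heq
            simp at heq
            rw [heq.1, heq.2]
        rw [hscan]
        show splitTagsLoop after (acc ++ [extendSep (PySem.Str.slice t (some 2) none) mid]) ""
            = acc ++ (PySem.Str.slice (PySem.Str.join " " (t :: mid)) (some 2) (some (-2)) :: scanB after)
        rw [ih after _ hafterlen hpafter hqafter]
        have hc2 : 2 ≤ c.toList.length := by
          have h0 := (PySem.Chars.endswith_iff c.toList (("]]" : String).toList)).mp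
            (by rw [← PySem.Str.endswith_eq]; exact hc)
          have := h0.length_le
          simpa using this
        rw [hm, group_key t c m hlen hc2]
        simp
      · have hqrest : topQuirkFree rest = true := by
          rw [← topQuirkFree_cons_nonopener t rest hs]
          exact hq
        rw [if_neg hs, ih rest (acc ++ [t]) hrest hprest hqrest]
        rw [scanB, if_neg hs]
        simp

theorem loop_eq_scanB (toks : List String) (hp : preTok toks = true)
    (hq : topQuirkFree toks = true) :
    splitTagsLoop toks [] "" = scanB toks :=
  loop_eq_scanB_aux toks.length toks [] le_rfl hp hq

-- accumulated output only ever grows at the tail: the accumulator factors out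
theorem loop_append (toks : List String) : ∀ (a b : List String) (sep : String),
    splitTagsLoop toks (a ++ b) sep = a ++ splitTagsLoop toks b sep := by
  induction toks with
  | nil => intro a b sep; simp [splitTagsLoop]
  | cons p rest ih =>
    intro a b sep
    rw [splitTagsLoop, splitTagsLoop]
    split_ifs with h1 h2 h3
    · rw [List.append_assoc, ih]
    · exact ih a b _
    · exact ih a b _
    · rw [List.append_assoc, ih]

-- tokens produced by splitting on " " contain no space character
theorem splitOn_go_spaceless : ∀ (fuel : Nat) (l cur : List Char) (acc : List (List Char)),
    l.length < fuel → (∀ y ∈ acc, ' ' ∉ y) → ' ' ∉ cur →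
    ∀ x ∈ PySem.Chars.splitOn.go [' '] fuel l cur acc, ' ' ∉ x := by
  intro fuel
  induction fuel with
  | zero => intro l cur acc h; omega
  | succ f ih =>
    intro l cur acc h hacc hcur x hx
    cases l with
    | nil =>
      rw [PySem.Chars.splitOn.go.eq_def] at hx
      simp only [List.mem_reverse, List.mem_cons] at hx
      rcases hx with rfl | hx
      · simpa using hcur
      · exact hacc x hx
    | cons c rest =>
      rw [PySem.Chars.splitOn.go.eq_def] at hx
      simp only [] at hx
      by_cases hc : (([' '] : List Char).isPrefixOf (c :: rest)) = true
      · rw [if_pos hc] at hx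
        refine ih _ _ _ (by simp at h ⊢; omega) ?_ (by simp) x hx
        intro y hy
        rcases List.mem_cons.mp hy with rfl | hy'
        · simpa using hcur
        · exact hacc y hy'
      · rw [if_neg hc] at hx
        have hcne : c ≠ ' ' := by
          intro hceq
          subst hceq
          simp [List.isPrefixOf] at hc
        refine ih _ _ _ (by simp at h ⊢; omega) hacc ?_ x hx
        simp only [List.mem_cons]
        rintro (rfl | hsp)
        · exact hcne rfl
        · exact hcur hsp

theorem tokens_spaceless (s : String) : ∀ x ∈ pySplitSpace s, ' ' ∉ x.toList := by
  intro x hx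
  have hps : pySplitSpace s = (PySem.Chars.splitOn s.toList [' ']).map String.ofList := by
    simp [pySplitSpace, PySem.Str.split?, PySem.Chars.split?]
  rw [hps, List.mem_map] at hx
  obtain ⟨cs, hcs, rfl⟩ := hx
  have h1 : ' ' ∉ cs := by
    rw [PySem.Chars.splitOn] at hcs
    exact splitOn_go_spaceless (s.toList.length + 1) s.toList [] [] (by omega)
      (by simp) (by simp) cs hcs
  simpa using h1

-- xs[2:-2] is a take-of-drop (for lists of length at least 2)
theorem slice_2_neg2 (l : List Char) (h : 2 ≤ l.length) :
    PySem.List.slice l (some 2) (some (-2)) = List.take (l.length - 4) (List.drop 2 l) := by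
  simp [PySem.List.slice, PySem.List.clampIdx]
  have h2 : min 2 l.length = 2 := by omega
  rw [h2]
  split_ifs with hh
  · omega
  · congr 1
    omega

theorem glue_head (mid : List String) (h : mid ≠ []) : (glue mid).head? = some ' ' := by
  cases mid with
  | nil => exact absurd rfl h
  | cons p rest => simp [glue]

-- the first tag A emits (from state sep = "") never begins with a space:
-- it is a space-free token or begins with the opener's space-free remainder
theorem loopA_head (toks : List String) (hsp : ∀ x ∈ toks, ' ' ∉ x.toList) :
    ∀ x, (splitTagsLoop toks [] "").head? = some x → x.toList.head? ≠ some ' ' := by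
  induction toks with
  | nil => simp [splitTagsLoop]
  | cons t rest ih =>
    intro x hx
    rw [splitTagsLoop, if_neg (by simp : ¬("" : String) ≠ "")] at hx
    by_cases hs : PySem.Str.startswith t "[[" = true
    · rw [if_pos hs] at hx
      by_cases h0 : PySem.Str.slice t (some 2) none = ""
      · rw [h0] at hx
        exact ih (fun y hy => hsp y (List.mem_cons_of_mem _ hy)) x hx
      · rw [loop_accum rest [] _ h0] at hx
        cases hfc : findClose rest with
        | none => rw [hfc] at hx; simp at hx
        | some pr =>
          obtain ⟨mid, after⟩ := pr
          rw [hfc] at hx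
          simp only [] at hx
          rw [show ([] : List String) ++ [extendSep (PySem.Str.slice t (some 2) none) mid]
              = [extendSep (PySem.Str.slice t (some 2) none) mid] ++ [] from by simp,
            loop_append] at hx
          simp only [List.cons_append, List.nil_append, List.head?_cons, Option.some.injEq] at hx
          subst hx
          obtain ⟨m, c, hm, -, -⟩ := findClose_spec rest mid after hfc
          have hsepl : (PySem.Str.slice t (some 2) none).toList = t.toList.drop 2 := by
            rw [PySem.Str.toList_slice, PySem.Chars.slice_eq_listSlice,
                PySem.List.slice_from t.toList (by norm_num : (0:Int) ≤ (2:Int))]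
            rfl
          rw [hm, extendSep_toList]
          have hne0 : (PySem.Str.slice t (some 2) none).toList ≠ [] := by
            intro hc0
            apply h0
            apply String.toList_inj.mp
            rw [hc0]
            rfl
          rw [List.append_assoc, List.head?_append_of_ne_nil _ hne0]
          intro hcon
          have hmem : ' ' ∈ (PySem.Str.slice t (some 2) none).toList :=
            List.mem_of_mem_head? hcon
          rw [hsepl] at hmem
          exact hsp t (List.mem_cons_self) (List.mem_of_mem_drop hmem)
    · rw [if_neg hs] at hx
      rw [show ([] : List String) ++ [t] = [t] ++ [] from by simp, loop_append] at hx
      simp only [List.cons_append, List.nil_append, List.head?_cons, Option.some.injEq] at hx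
      subst hx
      intro hcon
      exact hsp _ (List.mem_cons_self) (List.mem_of_mem_head? hcon)

-- the two programs disagree as soon as a quirky token appears outside a group
theorem loop_ne_scanB_aux (n : Nat) : ∀ (toks acc : List String), toks.length ≤ n →
    preTok toks = true → (∀ x ∈ toks, ' ' ∉ x.toList) → topQuirkFree toks = false →
    splitTagsLoop toks acc "" ≠ acc ++ scanB toks := by
  induction n with
  | zero =>
    intro toks acc h _ _ htq
    have ht : toks = [] := by
      cases toks with
      | nil => rfl
      | cons a b => simp at h
    subst ht
    simp [topQuirkFree, topQuirkFreeF] at htq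
  | succ n ih =>
    intro toks acc h hp hsp htq
    cases toks with
    | nil => simp [topQuirkFree, topQuirkFreeF] at htq
    | cons t rest =>
      have hrest : rest.length ≤ n := by simp at h; omega
      have hprest : preTok rest = true := by
        rw [preTok, Bool.and_eq_true] at hp
        exact hp.2
      have hsprest : ∀ x ∈ rest, ' ' ∉ x.toList :=
        fun x hx => hsp x (List.mem_cons_of_mem _ hx)
      rw [splitTagsLoop, if_neg (by simp : ¬("" : String) ≠ "")]
      by_cases hs : PySem.Str.startswith t "[[" = true
      · have hpre2 : ['[', '['] <+: t.toList := by
          have h0 := (PySem.Chars.startswith_iff t.toList (("[[" : String).toList)).mp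
            (by rw [← PySem.Str.startswith_eq]; exact hs)
          exact h0
        by_cases hq : quirkTok t = true
        · -- the quirky token itself: the outputs differ here
          by_cases hse : PySem.Str.endswith t "]]" = true
          · -- t both opens and closes: A accumulates past it, B closes at once
            have hsuf : [']', ']'] <:+ t.toList :=
              (PySem.Chars.endswith_iff t.toList (("]]" : String).toList)).mp
                (by rw [← PySem.Str.endswith_eq]; exact hse)
            have hlen : 2 < t.toList.length := by
              rcases Nat.lt_or_ge 2 t.toList.length with hl | hl
              · exact hl
              · exfalso
                have hteq : t.toList = ['[', '['] :=
                  (hpre2.eq_of_length_le (by simpa using hl)).symm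
                rw [hteq] at hsuf
                obtain ⟨pre, hpe⟩ := hsuf
                have : pre = [] := by
                  have := congrArg List.length hpe
                  simp at this
                  simpa using this
                subst this
                simp at hpe
            have hsepl : (PySem.Str.slice t (some 2) none).toList = t.toList.drop 2 := by
              rw [PySem.Str.toList_slice, PySem.Chars.slice_eq_listSlice,
                  PySem.List.slice_from t.toList (by norm_num : (0:Int) ≤ (2:Int))]
              rfl
            have hsep : PySem.Str.slice t (some 2) none ≠ "" := by
              intro hc
              have h1 : (List.drop 2 t.toList).length = 0 := by
                rw [← hsepl, hc]
                rfl
              rw [List.length_drop] at h1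
              omega
            have hfcself : findClose (t :: rest) = some ([t], rest) := by
              rw [findClose, if_pos hse]
            have hscan : scanB (t :: rest)
                = PySem.Str.slice (PySem.Str.join " " [t]) (some 2) (some (-2)) :: scanB rest := by
              rw [scanB, if_pos hs]
              split
              · rename_i heq
                rw [hfcself] at heq
                exact absurd heq (by simp)
              · rename_i mid1 after1 heq
                rw [hfcself] at heq
                simp at heq
                rw [← heq.1, heq.2]
            have hjoin1 : PySem.Str.join " " [t] = t := by
              apply String.toList_inj.mp
              rw [PySem.Str.toList_join]
              simp [PySem.Chars.join_singleton]
            have hblen : (PySem.Str.slice t (some 2) (some (-2))).toList.length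
                ≤ t.toList.length - 4 := by
              rw [PySem.Str.toList_slice, PySem.Chars.slice_eq_listSlice,
                  slice_2_neg2 t.toList (by omega)]
              simp
            rw [if_pos hs, hscan, hjoin1, loop_accum rest acc _ hsep]
            cases hfc : findClose rest with
            | none =>
              simp only []
              intro hcon
              have := congrArg List.length hcon
              simp at this
            | some pr =>
              obtain ⟨mid, after⟩ := pr
              simp only []
              obtain ⟨m, c, hm, hc, -⟩ := findClose_spec rest mid after hfc
              have hc2 : 2 ≤ c.toList.length := by
                have h0 := (PySem.Chars.endswith_iff c.toList (("]]" : String).toList)).mp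
                  (by rw [← PySem.Str.endswith_eq]; exact hc)
                have := h0.length_le
                simpa using this
              rw [show acc ++ [extendSep (PySem.Str.slice t (some 2) none) mid]
                  = (acc ++ [extendSep (PySem.Str.slice t (some 2) none) mid]) ++ [] from by simp,
                loop_append]
              intro hcon
              rw [List.append_assoc] at hcon
              have htail := List.append_cancel_left hcon
              simp only [List.singleton_append, List.cons.injEq] at htail
              have hteq := htail.1
              have hlena : (extendSep (PySem.Str.slice t (some 2) none) mid).toList.length
                  = (PySem.Str.slice t (some 2) none).toList.length
                    + (glue m).length + 1 + (c.toList.length - 2) := by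
                rw [hm, extendSep_toList]
                simp
                omega
              rw [hsepl, List.length_drop] at hlena
              have := congrArg (fun z => z.toList.length) hteq
              simp only [] at this
              omega
          · -- t is the bare "[[": A silently resets, B opens a real group
            have hnef : PySem.Str.endswith t "]]" = false := by
              cases hb : PySem.Str.endswith t "]]" with
              | false => rfl
              | true => exact absurd hb hse
            have hteq : t = "[[" := by
              rw [quirkTok, hs, Bool.true_and, hnef, Bool.false_or] at hq
              exact eq_of_beq hq
            have h0 : PySem.Str.slice t (some 2) none = "" := by
              rw [hteq]
              decide
            have hcl : hasCloser rest = true := by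
              rw [preTok, Bool.and_eq_true, Bool.or_eq_true] at hp
              rcases hp.1 with h1 | h1
              · rw [Bool.not_eq_eq_eq_not, Bool.not_true] at h1
                rw [h1] at hs
                exact absurd hs (by simp)
              · simp only [hasCloser, List.any_eq_true] at h1 ⊢
                rcases h1 with ⟨x, hx, hex⟩
                rcases List.mem_cons.mp hx with rfl | hx'
                · rw [hnef] at hex
                  exact absurd hex (by simp)
                · exact ⟨x, hx', hex⟩
            obtain ⟨mid, after, hfc⟩ := hasCloser_findClose rest hcl
            obtain ⟨m, c, hm, hc, hrest_eq⟩ := findClose_spec rest mid after hfc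
            have hc2 : 2 ≤ c.toList.length := by
              have hcc := (PySem.Chars.endswith_iff c.toList (("]]" : String).toList)).mp
                (by rw [← PySem.Str.endswith_eq]; exact hc)
              have := hcc.length_le
              simpa using this
            have hfc2 : findClose (t :: rest) = some (t :: mid, after) := by
              rw [findClose, if_neg (by rw [hnef]; simp), hfc]
            have hscan : scanB (t :: rest)
                = PySem.Str.slice (PySem.Str.join " " (t :: mid)) (some 2) (some (-2))
                  :: scanB after := by
              rw [scanB, if_pos hs]
              split
              · rename_i heq
                rw [hfc2] at heq
                exact absurd heq (by simp)
              · rename_i mid1 after1 heq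
                rw [hfc2] at heq
                simp at heq
                rw [heq.1, heq.2]
            rw [if_pos hs, h0, hscan]
            have hLA : splitTagsLoop rest acc "" = acc ++ splitTagsLoop rest [] "" := by
              conv_lhs => rw [show acc = acc ++ ([] : List String) from by simp]
              rw [loop_append]
            rw [hLA]
            have hmne : mid ≠ [] := by
              rw [hm]
              simp
            have hg3 : 3 ≤ (glue mid).length := by
              rw [hm, show glue (m ++ [c]) = glue m ++ ' ' :: c.toList from by simp [glue]]
              simp
              have hc2' : (2 : Nat) ≤ c.length := by simpa using hc2
              omega
            obtain ⟨g', hg'⟩ : ∃ g', glue mid = ' ' :: g' := by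
              cases hgl : glue mid with
              | nil =>
                have := glue_head mid hmne
                rw [hgl] at this
                simp at this
              | cons a g' =>
                have := glue_head mid hmne
                rw [hgl] at this
                simp at this
                exact ⟨g', by rw [this]⟩
            have hbh : (PySem.Str.slice (PySem.Str.join " " (t :: mid))
                (some 2) (some (-2))).toList.head? = some ' ' := by
              rw [PySem.Str.toList_slice, PySem.Chars.slice_eq_listSlice, join_toList, hteq]
              rw [show ("[[" : String).toList ++ glue mid = '[' :: '[' :: glue mid from rfl]
              rw [slice_2_neg2 _ (by simp)]
              simp only [List.drop_succ_cons, List.drop_zero]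
              rw [hg']
              rw [show ('[' :: '[' :: ' ' :: g').length - 4 = (g'.length - 2) + 1 from by
                have := hg3
                rw [hg'] at this
                simp at this ⊢
                omega]
              rw [List.take_succ_cons]
              rfl
            intro hcon
            have htail := List.append_cancel_left hcon
            cases hL : (splitTagsLoop rest [] "").head? with
            | none =>
              rw [htail] at hL
              simp at hL
            | some x =>
              have hxne := loopA_head rest hsprest x hL
              rw [htail] at hL
              simp at hL
              rw [← hL] at hxne
              exact hxne hbh
        · -- a clean opener: both sides consume the same group, recurse
          have hqtf : quirkTok t = false := by
            cases hb : quirkTok t with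
            | false => rfl
            | true => exact absurd hb hq
          have hqt' : PySem.Str.endswith t "]]" = false ∧ (t == "[[") = false := by
            rw [quirkTok, hs, Bool.true_and, Bool.or_eq_false_iff] at hqtf
            exact hqtf
          have hne : PySem.Str.endswith t "]]" = false := hqt'.1
          have hnb : t ≠ "[[" := by
            intro hc
            rw [hc] at hqt'
            simp at hqt'
          have hpre2 : ['[', '['] <+: t.toList := by
            have h0 := (PySem.Chars.startswith_iff t.toList (("[[" : String).toList)).mp
              (by rw [← PySem.Str.startswith_eq]; exact hs)
            exact h0
          have hlen : 2 < t.toList.length := by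
            obtain ⟨tail, htl⟩ := hpre2
            rcases tail with - | ⟨x, xs⟩
            · exfalso
              apply hnb
              apply String.toList_inj.mp
              rw [← htl]
              rfl
            · rw [← htl]
              simp
          have hsepl : (PySem.Str.slice t (some 2) none).toList = t.toList.drop 2 := by
            rw [PySem.Str.toList_slice, PySem.Chars.slice_eq_listSlice,
                PySem.List.slice_from t.toList (by norm_num : (0:Int) ≤ (2:Int))]
            rfl
          have hsep : PySem.Str.slice t (some 2) none ≠ "" := by
            intro hc
            have h1 : (List.drop 2 t.toList).length = 0 := by
              rw [← hsepl, hc]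
              rfl
            rw [List.length_drop] at h1
            omega
          have hcl : hasCloser rest = true := by
            rw [preTok, Bool.and_eq_true, Bool.or_eq_true] at hp
            rcases hp.1 with h1 | h1
            · rw [Bool.not_eq_eq_eq_not, Bool.not_true] at h1
              rw [h1] at hs
              exact absurd hs (by simp)
            · simp only [hasCloser, List.any_eq_true] at h1 ⊢
              rcases h1 with ⟨x, hx, hex⟩
              rcases List.mem_cons.mp hx with rfl | hx'
              · rw [hne] at hex
                exact absurd hex (by simp)
              · exact ⟨x, hx', hex⟩
          obtain ⟨mid, after, hfc⟩ := hasCloser_findClose rest hcl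
          obtain ⟨m, c, hm, hc, hrest_eq⟩ := findClose_spec rest mid after hfc
          have hc2 : 2 ≤ c.toList.length := by
            have hcc := (PySem.Chars.endswith_iff c.toList (("]]" : String).toList)).mp
              (by rw [← PySem.Str.endswith_eq]; exact hc)
            have := hcc.length_le
            simpa using this
          have hfc2 : findClose (t :: rest) = some (t :: mid, after) := by
            rw [findClose, if_neg (by rw [hne]; simp), hfc]
          have hafter_suffix : after <:+ rest := ⟨m ++ [c], by simp [hrest_eq]⟩
          have hafterlen : after.length ≤ n := by
            have := findClose_after_lt rest mid after hfc
            omega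
          have hpafter : preTok after = true := preTok_suffix rest after hafter_suffix hprest
          have hspafter : ∀ x ∈ after, ' ' ∉ x.toList :=
            fun x hx => hsprest x (hafter_suffix.subset hx)
          have hqafter : topQuirkFree after = false := by
            rw [topQuirkFree_cons_opener t rest mid after hs hfc, hqtf] at htq
            simpa using htq
          have hscan : scanB (t :: rest)
              = PySem.Str.slice (PySem.Str.join " " (t :: mid)) (some 2) (some (-2))
                :: scanB after := by
            rw [scanB, if_pos hs]
            split
            · rename_i heq
              rw [hfc2] at heq
              exact absurd heq (by simp)
            · rename_i mid1 after1 heq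
              rw [hfc2] at heq
              simp at heq
              rw [heq.1, heq.2]
          rw [if_pos hs, loop_accum rest acc _ hsep, hfc, hscan]
          show splitTagsLoop after (acc ++ [extendSep (PySem.Str.slice t (some 2) none) mid]) ""
              ≠ acc ++ (PySem.Str.slice (PySem.Str.join " " (t :: mid)) (some 2) (some (-2))
                :: scanB after)
          rw [hm, group_key t c m hlen hc2, ← hm]
          rw [show acc ++ (PySem.Str.slice (PySem.Str.join " " (t :: mid)) (some 2) (some (-2))
                :: scanB after)
              = (acc ++ [PySem.Str.slice (PySem.Str.join " " (t :: mid)) (some 2) (some (-2))])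
                ++ scanB after from by simp]
          exact ih after _ hafterlen hpafter hspafter hqafter
      · -- a plain token: both sides emit it, recurse
        have hqrest : topQuirkFree rest = false := by
          rw [← topQuirkFree_cons_nonopener t rest hs]
          exact htq
        rw [if_neg hs, scanB, if_neg hs]
        rw [show acc ++ t :: scanB rest = (acc ++ [t]) ++ scanB rest from by simp]
        exact ih rest (acc ++ [t]) hrest hprest hsprest hqrest

-- findClose finds the FIRST closing token: everything before it is closer-free
theorem findClose_spec' (toks : List String) : ∀ mid after, findClose toks = some (mid, after) →
    ∃ m c, mid = m ++ [c] ∧ PySem.Str.endswith c "]]" = true ∧ toks = m ++ c :: after ∧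
      ∀ x ∈ m, PySem.Str.endswith x "]]" = false := by
  induction toks with
  | nil => intro mid after h; simp [findClose] at h
  | cons p rest ih =>
    intro mid after h
    by_cases he : PySem.Str.endswith p "]]" = true
    · rw [findClose, if_pos he] at h
      simp at h
      exact ⟨[], p, by simp [← h.1], he, by simp [h.2], by simp⟩
    · rw [findClose, if_neg he] at h
      cases hfc : findClose rest with
      | none => rw [hfc] at h; simp at h
      | some pr =>
        obtain ⟨m0, a0⟩ := pr
        rw [hfc] at h
        simp at h
        obtain ⟨m, c, hm, hc, ht, hmf⟩ := ih m0 a0 hfc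
        refine ⟨p :: m, c, by simp [← h.1, hm], hc, by simp [ht, ← h.2], ?_⟩
        intro x hx
        rcases List.mem_cons.mp hx with rfl | hx'
        · cases hb : PySem.Str.endswith x "]]" with
          | false => rfl
          | true => exact absurd hb he
        · exact hmf x hx'

-- index-quantified restatement of quirkAtTop, used by the proofs
def quirkAtTopIdx (toks : List String) : Prop :=
  ∃ i, i < toks.length ∧ quirkTok (toks.getD i "") = true ∧
    ∀ j, j < i → PySem.Str.startswith (toks.getD j "") "[[" = true →
      ∃ k, k < i ∧ j ≤ k ∧ PySem.Str.endswith (toks.getD k "") "]]" = true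

theorem getD_take (l : List String) (i j : Nat) (h : j < i) :
    (l.take i).getD j "" = l.getD j "" := by
  rw [List.getD_eq_getElem?_getD, List.getD_eq_getElem?_getD, List.getElem?_take_of_lt h]

theorem getD_last (u : List String) (a : String) :
    (u ++ [a]).getD u.length "" = a := by
  rw [List.getD_append_right u [a] "" u.length le_rfl]
  simp

theorem getD_front (u : List String) (a : String) (j : Nat) (h : j < u.length) :
    (u ++ [a]).getD j "" = u.getD j "" :=
  List.getD_append u [a] "" j h

-- "the nearest bracket-relevant token on the left is a closer" ⟺
-- "every opener on the left is followed (at or after it) by a closer"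
theorem brackets_iff (u : List String) :
    (∀ x ∈ u.reverse.find?
        (fun v => PySem.Str.startswith v "[[" || PySem.Str.endswith v "]]"),
      PySem.Str.endswith x "]]" = true)
      ↔ (∀ j, j < u.length → PySem.Str.startswith (u.getD j "") "[[" = true →
          ∃ k, k < u.length ∧ j ≤ k ∧ PySem.Str.endswith (u.getD k "") "]]" = true) := by
  induction u using List.reverseRecOn with
  | nil => simp
  | append_singleton u' a ih =>
    rw [List.reverse_append, List.reverse_singleton, List.singleton_append]
    by_cases hp : (PySem.Str.startswith a "[[" || PySem.Str.endswith a "]]") = true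
    · rw [List.find?_cons_of_pos (p := fun v => PySem.Str.startswith v "[[" || PySem.Str.endswith v "]]") (h := hp)]
      constructor
      · intro h j hj hjs
        cases hb : PySem.Str.endswith a "]]" with
        | true =>
          refine ⟨u'.length, by simp, by simp at hj; omega, ?_⟩
          rw [getD_last]
          exact hb
        | false =>
          have hsa : PySem.Str.startswith a "[[" = true := by
            rw [hb] at hp
            simpa using hp
          have := h a (by simp)
          rw [hb] at this
          simp at this
      · intro h x hx
        simp at hx
        subst hx
        cases hb : PySem.Str.endswith a "]]" with
        | true => rfl
        | false =>
          have hsa : PySem.Str.startswith a "[[" = true := by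
            rw [hb] at hp
            simpa using hp
          obtain ⟨k, hk1, hk2, hk3⟩ := h u'.length (by simp)
            (by rw [getD_last]; exact hsa)
          have hke : k = u'.length := by
            simp at hk1
            omega
          rw [hke, getD_last] at hk3
          rw [hb] at hk3
          simp at hk3
    · rw [List.find?_cons_of_neg (p := fun v => PySem.Str.startswith v "[[" || PySem.Str.endswith v "]]") (h := by simpa using hp)]
      have hpa : PySem.Str.startswith a "[[" = false ∧ PySem.Str.endswith a "]]" = false := by
        cases h1 : PySem.Str.startswith a "[[" with
        | true => exact absurd (by rw [h1]; simp) hp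
        | false =>
          cases h2 : PySem.Str.endswith a "]]" with
          | true => exact absurd (by rw [h2]; simp) hp
          | false => exact ⟨rfl, rfl⟩
      rw [ih]
      constructor
      · intro h j hj hjs
        have hjlt : j < u'.length := by
          rcases Nat.lt_or_ge j u'.length with hl | hl
          · exact hl
          · exfalso
            have hje : j = u'.length := by
              simp at hj
              omega
            rw [hje, getD_last] at hjs
            rw [hpa.1] at hjs
            simp at hjs
        rw [getD_front u' a j hjlt] at hjs
        obtain ⟨k, hk1, hk2, hk3⟩ := h j hjlt hjs
        exact ⟨k, by simp; omega, hk2, by rw [getD_front u' a k hk1]; exact hk3⟩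
      · intro h j hj hjs
        obtain ⟨k, hk1, hk2, hk3⟩ := h j (by simp; omega)
          (by rw [getD_front u' a j hj]; exact hjs)
        have hklt : k < u'.length := by
          rcases Nat.lt_or_ge k u'.length with hl | hl
          · exact hl
          · exfalso
            have hke : k = u'.length := by
              simp at hk1
              omega
            rw [hke, getD_last] at hk3
            rw [hpa.2] at hk3
            simp at hk3
        rw [getD_front u' a k hklt] at hk3
        exact ⟨k, hklt, hk2, hk3⟩

theorem quirkAtTop_iff (toks : List String) : quirkAtTop toks ↔ quirkAtTopIdx toks := by
  unfold quirkAtTop quirkAtTopIdx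
  refine exists_congr fun i => ?_
  constructor
  · rintro ⟨hi, hq, hfind⟩
    refine ⟨hi, hq, ?_⟩
    have hlen : (toks.take i).length = i := by
      rw [List.length_take]
      omega
    have h := (brackets_iff (toks.take i)).mp hfind
    intro j hj hjs
    obtain ⟨k, hk1, hk2, hk3⟩ := h j (by omega) (by rw [getD_take _ _ _ hj]; exact hjs)
    rw [hlen] at hk1
    exact ⟨k, hk1, hk2, by rw [← getD_take toks i k hk1]; exact hk3⟩
  · rintro ⟨hi, hq, hcond⟩
    refine ⟨hi, hq, ?_⟩
    have hlen : (toks.take i).length = i := by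
      rw [List.length_take]
      omega
    apply (brackets_iff (toks.take i)).mpr
    intro j hj hjs
    rw [hlen] at hj
    obtain ⟨k, hk1, hk2, hk3⟩ := hcond j hj (by rw [← getD_take toks i j hj]; exact hjs)
    exact ⟨k, by omega, hk2, by rw [getD_take toks i k hk1]; exact hk3⟩

theorem getD_shift (t : String) (rest : List String) (k : Nat) (hk : k ≠ 0) :
    (t :: rest).getD k "" = rest.getD (k - 1) "" := by
  cases k with
  | zero => exact absurd rfl hk
  | succ k' => simp

theorem getD_group (t : String) (m : List String) (c : String) (after : List String) (i' : Nat) :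
    (t :: (m ++ c :: after)).getD (m.length + 2 + i') "" = after.getD i' "" := by
  rw [show m.length + 2 + i' = (m.length + 1 + i') + 1 from by omega, List.getD_cons_succ]
  rw [List.getD_append_right m (c :: after) "" (m.length + 1 + i') (by omega)]
  rw [show m.length + 1 + i' - m.length = i' + 1 from by omega, List.getD_cons_succ]

theorem getD_mid (t : String) (m : List String) (c : String) (after : List String) :
    (t :: (m ++ c :: after)).getD (m.length + 1) "" = c := by
  rw [List.getD_cons_succ, List.getD_append_right m (c :: after) "" m.length (by omega)]
  simp

theorem getD_mem' (l : List String) (n : Nat) (h : n < l.length) : l.getD n "" ∈ l := by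
  rw [List.getD_eq_getElem l "" h]
  exact List.getElem_mem h

theorem quirkAtTop_here (t : String) (rest : List String) (hq : quirkTok t = true) :
    quirkAtTopIdx (t :: rest) := by
  exact ⟨0, by simp, by simpa using hq, fun j hj => absurd hj (by omega)⟩

theorem quirkAtTop_cons (t : String) (rest : List String)
    (hs : PySem.Str.startswith t "[[" = false) (h : quirkAtTopIdx rest) :
    quirkAtTopIdx (t :: rest) := by
  obtain ⟨i, hi, hq, hcond⟩ := h
  refine ⟨i + 1, by simpa using hi, by simpa using hq, ?_⟩
  intro j hj hjs
  cases j with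
  | zero =>
    rw [List.getD_cons_zero] at hjs
    rw [hjs] at hs
    simp at hs
  | succ j' =>
    rw [List.getD_cons_succ] at hjs
    obtain ⟨k, hk1, hk2, hk3⟩ := hcond j' (by omega) hjs
    exact ⟨k + 1, by omega, by omega, by simpa using hk3⟩

-- lift a top-level quirk over one whole bracketed group
theorem quirkAtTop_group (t c : String) (m after : List String)
    (hc : PySem.Str.endswith c "]]" = true) (h : quirkAtTopIdx after) :
    quirkAtTopIdx (t :: (m ++ c :: after)) := by
  obtain ⟨i, hi, hq, hcond⟩ := h
  have hgd : ∀ i', (t :: (m ++ c :: after)).getD (m.length + 2 + i') "" = after.getD i' "" :=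
    getD_group t m c after
  have hgc : (t :: (m ++ c :: after)).getD (m.length + 1) "" = c := getD_mid t m c after
  refine ⟨m.length + 2 + i, by simp; omega, by rw [hgd]; exact hq, ?_⟩
  intro j hj hjs
  by_cases hj1 : j ≤ m.length + 1
  · exact ⟨m.length + 1, by omega, by omega, by rw [hgc]; exact hc⟩
  · obtain ⟨k, hk1, hk2, hk3⟩ := hcond (j - (m.length + 2)) (by omega) (by
      rw [← hgd (j - (m.length + 2)), show m.length + 2 + (j - (m.length + 2)) = j from by omega]
      exact hjs)
    refine ⟨k + m.length + 2, by omega, by omega, ?_⟩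
    rw [show k + m.length + 2 = m.length + 2 + k from by omega, hgd]
    exact hk3

-- the recursive check says "false" exactly on the lists with a top-level quirky token (⇒)
theorem tqf_false_quirkAtTop (n : Nat) : ∀ toks, toks.length ≤ n →
    topQuirkFree toks = false → quirkAtTopIdx toks := by
  induction n with
  | zero =>
    intro toks h htq
    have ht : toks = [] := by
      cases toks with
      | nil => rfl
      | cons a b => simp at h
    subst ht
    simp [topQuirkFree, topQuirkFreeF] at htq
  | succ n ih =>
    intro toks h htq
    cases toks with
    | nil => simp [topQuirkFree, topQuirkFreeF] at htq
    | cons t rest =>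
      have hrest : rest.length ≤ n := by simp at h; omega
      by_cases hs : PySem.Str.startswith t "[[" = true
      · by_cases hq : quirkTok t = true
        · exact quirkAtTop_here t rest hq
        · have hqf : quirkTok t = false := by
            cases hb : quirkTok t with
            | false => rfl
            | true => exact absurd hb hq
          rw [topQuirkFree, List.length_cons] at htq
          simp only [topQuirkFreeF] at htq
          rw [if_pos hs, hqf] at htq
          simp only [Bool.not_false, Bool.true_and] at htq
          cases hd : dropGroup rest with
          | none => rw [hd] at htq; simp at htq
          | some after =>
            rw [hd] at htq
            have htq' : topQuirkFreeF rest.length after = false := htq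
            rw [dropGroup_eq] at hd
            cases hfc0 : findClose rest with
            | none => rw [hfc0] at hd; simp at hd
            | some pr =>
              obtain ⟨mid0, after0⟩ := pr
              rw [hfc0] at hd
              simp at hd
              obtain ⟨m, c, hm, hc, hrest_eq, hmf⟩ := findClose_spec' rest mid0 after0 hfc0
              have hafterlt := findClose_after_lt rest mid0 after0 hfc0
              have htqa : topQuirkFree after0 = false := by
                rw [topQuirkFree,
                  ← tqf_congr rest.length after0.length after0 (le_of_lt hafterlt) le_rfl, hd]
                exact htq'
              have hqa := ih after0 (by omega) htqa
              rw [hrest_eq]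
              exact quirkAtTop_group t c m after0 hc hqa
      · have hqrest : topQuirkFree rest = false := by
          rw [← topQuirkFree_cons_nonopener t rest hs]
          exact htq
        exact quirkAtTop_cons t rest (by
          cases hb : PySem.Str.startswith t "[[" with
          | false => rfl
          | true => exact absurd hb hs) (ih rest hrest hqrest)

-- the recursive check says "false" exactly on the lists with a top-level quirky token (⇐)
theorem quirkAtTop_tqf_false (n : Nat) : ∀ toks, toks.length ≤ n →
    quirkAtTopIdx toks → topQuirkFree toks = false := by
  induction n with
  | zero =>
    intro toks h hqt
    have ht : toks = [] := by
      cases toks with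
      | nil => rfl
      | cons a b => simp at h
    subst ht
    obtain ⟨i, hi, -⟩ := hqt
    simp at hi
  | succ n ih =>
    intro toks h hqt
    cases toks with
    | nil =>
      obtain ⟨i, hi, -⟩ := hqt
      simp at hi
    | cons t rest =>
      obtain ⟨i, hi, hq, hcond⟩ := hqt
      by_cases hs : PySem.Str.startswith t "[[" = true
      · by_cases hqt0 : quirkTok t = true
        · rw [topQuirkFree, List.length_cons]
          simp only [topQuirkFreeF]
          rw [if_pos hs, hqt0]
          simp
        · have hqf : quirkTok t = false := by
            cases hb : quirkTok t with
            | false => rfl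
            | true => exact absurd hb hqt0
          have hi0 : i ≠ 0 := by
            intro h0
            subst h0
            rw [List.getD_cons_zero] at hq
            rw [hq] at hqf
            simp at hqf
          have htne : PySem.Str.endswith t "]]" = false := by
            rw [quirkTok, hs, Bool.true_and, Bool.or_eq_false_iff] at hqf
            exact hqf.1
          obtain ⟨k, hk1, hk2, hk3⟩ := hcond 0 (by omega) (by rw [List.getD_cons_zero]; exact hs)
          have hk0 : k ≠ 0 := by
            intro h0
            subst h0
            rw [List.getD_cons_zero] at hk3
            rw [htne] at hk3
            simp at hk3
          have hklen : k - 1 < rest.length := by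
            simp at hi
            omega
          have hcl : hasCloser rest = true := by
            simp only [hasCloser, List.any_eq_true]
            refine ⟨rest.getD (k - 1) "", getD_mem' rest (k - 1) hklen, ?_⟩
            rw [← getD_shift t rest k hk0]
            exact hk3
          obtain ⟨mid, after, hfc⟩ := hasCloser_findClose rest hcl
          obtain ⟨m, c, hm, hc, hrest_eq, hmf⟩ := findClose_spec' rest mid after hfc
          have hlen_eq : rest.length = m.length + 1 + after.length := by
            rw [hrest_eq]
            simp
            omega
          have him : m.length + 2 ≤ i := by
            by_contra hlt
            have hklt : k - 1 < m.length := by omega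
            have hgk : rest.getD (k - 1) "" = m.getD (k - 1) "" := by
              rw [hrest_eq, List.getD_append m (c :: after) "" (k - 1) hklt]
            have hmem : m.getD (k - 1) "" ∈ m := getD_mem' m (k - 1) hklt
            have hkend : PySem.Str.endswith (m.getD (k - 1) "") "]]" = true := by
              rw [← hgk, ← getD_shift t rest k hk0]
              exact hk3
            rw [hmf _ hmem] at hkend
            simp at hkend
          have hgd : ∀ i', (t :: rest).getD (m.length + 2 + i') "" = after.getD i' "" := by
            intro i'
            rw [hrest_eq]
            exact getD_group t m c after i'
          have hqafter : quirkAtTopIdx after := by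
            refine ⟨i - (m.length + 2), by simp at hi; omega, ?_, ?_⟩
            · rw [← hgd, show m.length + 2 + (i - (m.length + 2)) = i from by omega]
              exact hq
            · intro j' hj' hjs'
              obtain ⟨k', hk1', hk2', hk3'⟩ := hcond (m.length + 2 + j') (by omega)
                (by rw [hgd]; exact hjs')
              refine ⟨k' - (m.length + 2), by omega, by omega, ?_⟩
              rw [← hgd, show m.length + 2 + (k' - (m.length + 2)) = k' from by omega]
              exact hk3'
          have hafterlen : after.length ≤ n := by
            have := findClose_after_lt rest mid after hfc
            simp at h
            omega
          have hres := ih after hafterlen hqafter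
          rw [topQuirkFree_cons_opener t rest mid after hs hfc, hqf]
          simp [hres]
      · have hi0 : i ≠ 0 := by
          intro h0
          subst h0
          rw [List.getD_cons_zero] at hq
          rw [quirkTok, Bool.and_eq_true] at hq
          exact hs hq.1
        have hqrest : quirkAtTopIdx rest := by
          refine ⟨i - 1, by simp at hi; omega, ?_, ?_⟩
          · rw [← getD_shift t rest i hi0]
            exact hq
          · intro j hj hjs
            obtain ⟨k, hk1, hk2, hk3⟩ := hcond (j + 1) (by omega)
              (by rw [List.getD_cons_succ]; exact hjs)
            refine ⟨k - 1, by omega, by omega, ?_⟩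
            rw [← getD_shift t rest k (by omega)]
            exact hk3
        rw [topQuirkFree_cons_nonopener t rest hs]
        exact ih rest (by simp at h; omega) hqrest

-- ===== VERDICT (by name: the statements are the Claim_ definitions above) =====
theorem split_tags_spec : Claim_unchanged_split_tags := by
  intro s _ hpre
  unfold Spec_split_tags
  intro hnd
  unfold split_tags split_tags_alt
  split
  · rfl
  · rename_i hst
    have hq : topQuirkFree (pySplitSpace s) = true := by
      unfold D_split_tags at hnd
      cases hb : topQuirkFree (pySplitSpace s) with
      | false =>
        exact absurd ⟨hst, (quirkAtTop_iff (pySplitSpace s)).mpr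
          (tqf_false_quirkAtTop (pySplitSpace s).length _ le_rfl hb)⟩ hnd
      | true => rfl
    exact loop_eq_scanB (pySplitSpace s) hpre hq

theorem scanB_witness_eval : scanB ["[[tag]]"] = ["tag"] := by
  have hfc : findClose ["[[tag]]"] = some (["[[tag]]"], []) := by decide
  rw [scanB, if_pos (by decide)]
  split
  · rename_i heq
    rw [hfc] at heq
    exact absurd heq (by simp)
  · rename_i mid1 after1 heq
    rw [hfc] at heq
    simp at heq
    rw [← heq.1, heq.2]
    have h0 : scanB [] = [] := by
      rw [scanB.eq_def]
    rw [h0]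
    decide

theorem split_tags_tight : Claim_exact_split_tags := by
  intro s _ hpre hd
  unfold Pre_split_tags at hpre
  unfold D_split_tags at hd
  obtain ⟨hst, htq⟩ := hd
  unfold split_tags split_tags_alt
  rw [if_neg hst, if_neg hst]
  exact loop_ne_scanB_aux (pySplitSpace s).length (pySplitSpace s) [] le_rfl hpre
    (tokens_spaceless s) (quirkAtTop_tqf_false (pySplitSpace s).length _ le_rfl
      ((quirkAtTop_iff (pySplitSpace s)).mp htq))

theorem split_tags_changed : Claim_changed_split_tags := by
  unfold Claim_changed_split_tags
  refine ⟨by decide, by decide, by decide, by decide, ?_, by decide⟩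
  show split_tags_alt "[[tag]]" = ["tag"]
  rw [split_tags_alt, if_neg (by decide)]
  rw [show pySplitSpace "[[tag]]" = ["[[tag]]"] from by decide]
  exact scanB_witness_eval
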